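-- pv_equiv track=rewrite | github.com/markusmobius/htmleval | aca_eval.py | categorize_articles
-- ===== SOURCE A (Python) =====
-- def categorize_articles(results):
--     """Categorize articles into 4 groups based on original_label and gpt_classification."""
--     categories = {
--         'science_to_scientific': [],
--         'science_to_non_scientific': [],
--         'non_science_to_scientific': [],
--         'non_science_to_non_scientific': []
--     }
--
--     for article in results:
--         original = article.get('original_label', '')
--         gpt_class = article.get('gpt_classification', '')
--
--         if original == 'science' and gpt_class == 'scientific':
--             categories['science_to_scientific'].append(article)
--         elif original == 'science' and gpt_class == 'non-scientific':
--             categories['science_to_non_scientific'].append(article)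
--         elif original == 'non_science' and gpt_class == 'scientific':
--             categories['non_science_to_scientific'].append(article)
--         elif original == 'non_science' and gpt_class == 'non-scientific':
--             categories['non_science_to_non_scientific'].append(article)
--
--     return categories
-- ===== SOURCE B (Python) =====
-- def categorize_articles(results):
--     """Categorize articles into 4 groups based on original_label and gpt_classification."""
--     table = [
--         ('science_to_scientific', 'science', 'scientific'),
--         ('science_to_non_scientific', 'science', 'non-scientific'),
--         ('non_science_to_scientific', 'non_science', 'scientific'),
--         ('non_science_to_non_scientific', 'non_science', 'non-scientific'),
--     ]
--     return {
--         name: [a for a in results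
--                if a.get('original_label', '') == orig
--                and a.get('gpt_classification', '') == gpt]
--         for name, orig, gpt in table
--     }
-- ===== Notes on version B (the rewrite author's own statement) =====
-- stated objective: alternative
-- what changed: Replaces the single loop with a four-way if/elif cascade mutating four accumulator lists by a table of (name, original, gpt) triples and a dict comprehension that builds each category with its own filter pass over results.
import Mathlib
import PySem

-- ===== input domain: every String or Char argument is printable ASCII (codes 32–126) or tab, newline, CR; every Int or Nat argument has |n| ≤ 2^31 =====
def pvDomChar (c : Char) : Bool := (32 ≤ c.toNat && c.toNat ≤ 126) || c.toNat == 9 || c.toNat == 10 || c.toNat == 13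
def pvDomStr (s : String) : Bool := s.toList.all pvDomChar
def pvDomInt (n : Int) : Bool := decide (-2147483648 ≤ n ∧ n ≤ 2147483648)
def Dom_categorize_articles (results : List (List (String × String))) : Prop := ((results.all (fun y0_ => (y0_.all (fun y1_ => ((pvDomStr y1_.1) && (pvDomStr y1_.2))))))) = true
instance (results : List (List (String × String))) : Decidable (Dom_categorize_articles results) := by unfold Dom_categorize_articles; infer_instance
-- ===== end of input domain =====

-- B changes the decomposition (alternative): a table of (name, original, gpt) triples with one
-- filter pass per category, instead of A's single loop with an if/elif cascade over four accumulators.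

-- article.get(k, '') : first-match lookup in the association list (Python dict has unique keys)
def pvGetS (article : List (String × String)) (k : String) : String :=
  ((article.find? (fun p => p.1 == k)).map (·.2)).getD ""

-- ===== PORT A =====
-- loop body: the if/elif cascade appending to the matching accumulator
def pvCatStep (st : List (List (String × String)) × List (List (String × String)) ×
    List (List (String × String)) × List (List (String × String)))
    (article : List (String × String)) :
    List (List (String × String)) × List (List (String × String)) ×
    List (List (String × String)) × List (List (String × String)) :=
  let original := pvGetS article "original_label"
  let gpt_class := pvGetS article "gpt_classification"
  if original == "science" && gpt_class == "scientific" then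
    (st.1 ++ [article], st.2.1, st.2.2.1, st.2.2.2)
  else if original == "science" && gpt_class == "non-scientific" then
    (st.1, st.2.1 ++ [article], st.2.2.1, st.2.2.2)
  else if original == "non_science" && gpt_class == "scientific" then
    (st.1, st.2.1, st.2.2.1 ++ [article], st.2.2.2)
  else if original == "non_science" && gpt_class == "non-scientific" then
    (st.1, st.2.1, st.2.2.1, st.2.2.2 ++ [article])
  else st

def categorize_articles (results : List (List (String × String))) :
    List (String × List (List (String × String))) :=
  let st := results.foldl pvCatStep ([], [], [], [])
  [("science_to_scientific", st.1), ("science_to_non_scientific", st.2.1),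
   ("non_science_to_scientific", st.2.2.1), ("non_science_to_non_scientific", st.2.2.2)]

-- ===== PORT B =====
def pvTable : List (String × String × String) :=
  [("science_to_scientific", "science", "scientific"),
   ("science_to_non_scientific", "science", "non-scientific"),
   ("non_science_to_scientific", "non_science", "scientific"),
   ("non_science_to_non_scientific", "non_science", "non-scientific")]

def categorize_articles_alt (results : List (List (String × String))) :
    List (String × List (List (String × String))) :=
  pvTable.map (fun row =>
    (row.1, results.filter (fun a =>
      pvGetS a "original_label" == row.2.1 && pvGetS a "gpt_classification" == row.2.2)))

-- ===== PRECONDITION & SPEC =====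
def Spec_categorize_articles (results : List (List (String × String))) (out : List (String × List (List (String × String)))) : Prop := out = categorize_articles_alt results
instance (results : List (List (String × String))) (out : List (String × List (List (String × String)))) : Decidable (Spec_categorize_articles results out) := by unfold Spec_categorize_articles; infer_instance

-- ===== CLAIM (what is proved, stated in full; the proofs are below) =====
def Claim_equal_categorize_articles : Prop := ∀ (results : List (List (String × String))), Dom_categorize_articles results → Spec_categorize_articles results (categorize_articles results)

-- ===== LEMMAS AND PROOFS =====

-- the fold's four accumulators are each the corresponding filter, appended to the start state
theorem pvCat_fold (l : List (List (String × String)))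
    (a b c d : List (List (String × String))) :
    l.foldl pvCatStep (a, b, c, d) =
      (a ++ l.filter (fun x => pvGetS x "original_label" == "science" && pvGetS x "gpt_classification" == "scientific"),
       b ++ l.filter (fun x => pvGetS x "original_label" == "science" && pvGetS x "gpt_classification" == "non-scientific"),
       c ++ l.filter (fun x => pvGetS x "original_label" == "non_science" && pvGetS x "gpt_classification" == "scientific"),
       d ++ l.filter (fun x => pvGetS x "original_label" == "non_science" && pvGetS x "gpt_classification" == "non-scientific")) := by
  induction l generalizing a b c d with
  | nil => simp
  | cons x xs ih =>
    by_cases h1 : pvGetS x "original_label" = "science" ∧ pvGetS x "gpt_classification" = "scientific"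
    · simp [pvCatStep, h1.1, h1.2, List.foldl_cons, ih]
    · by_cases h2 : pvGetS x "original_label" = "science" ∧ pvGetS x "gpt_classification" = "non-scientific"
      · simp [pvCatStep, h2.1, h2.2, List.foldl_cons, ih]
      · by_cases h3 : pvGetS x "original_label" = "non_science" ∧ pvGetS x "gpt_classification" = "scientific"
        · simp [pvCatStep, h3.1, h3.2, List.foldl_cons, ih]
        · by_cases h4 : pvGetS x "original_label" = "non_science" ∧ pvGetS x "gpt_classification" = "non-scientific"
          · simp [pvCatStep, h4.1, h4.2, List.foldl_cons, ih]
          · have e1 : (pvGetS x "original_label" == "science" && pvGetS x "gpt_classification" == "scientific") = false := by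
              simp only [Bool.and_eq_false_iff, beq_eq_false_iff_ne, ne_eq]; tauto
            have e2 : (pvGetS x "original_label" == "science" && pvGetS x "gpt_classification" == "non-scientific") = false := by
              simp only [Bool.and_eq_false_iff, beq_eq_false_iff_ne, ne_eq]; tauto
            have e3 : (pvGetS x "original_label" == "non_science" && pvGetS x "gpt_classification" == "scientific") = false := by
              simp only [Bool.and_eq_false_iff, beq_eq_false_iff_ne, ne_eq]; tauto
            have e4 : (pvGetS x "original_label" == "non_science" && pvGetS x "gpt_classification" == "non-scientific") = false := by
              simp only [Bool.and_eq_false_iff, beq_eq_false_iff_ne, ne_eq]; tauto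
            simp [pvCatStep, e1, e2, e3, e4, List.foldl_cons, ih]

-- ===== VERDICT (by name: the statement is the Claim_ definition above) =====
theorem categorize_articles_spec : Claim_equal_categorize_articles := by
  intro results _
  unfold Spec_categorize_articles categorize_articles categorize_articles_alt pvTable
  simp [pvCat_fold]
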